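-- pv_equiv track=rewrite | github.com/Pepit-o/Dune_erosion_simple_simulation | main.py | pyramide_racines
-- ===== SOURCE A (Python) =====
-- Matrice = list[list[str]]
--
-- def pyramide_racines(n: int, x: int) -> Matrice:
--     M = [[' ' for _ in range(n)] for _ in range(n)]
--     for i in range(-1, -len(M), -1):
--         j = -(1 + i)
--         while j != len(M):
--             for k in range(j, len(M) - j):
--                 if k == len(M[0]) // 2 and abs(i) <= (len(M) // 2) - (x + 1):
--                     # La racine primaire est au centre de
--                     # la dune, le paramètre x limite sa hauteur
--                     M[i][k] = '│'
--                 elif i % 4 == 0 and x - i <= k <= len(M) - (x + 1) + i: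
--                     # Les racines secondaires sont espacées de
--                     # trois cases et limités en longueur par x
--                     M[i][k] = '─'
--                 else:
--                     M[i][k] = '■'
--             j += 1
--     return M
-- ===== SOURCE B (Python) =====
-- # Single pass: each cell computed once from a closed-form condition on (row, column).
-- def pyramide_racines(n: int, x: int) -> list:
--     if n <= 0:
--         return []
--     half = n // 2
--
--     def cell(d: int, k: int) -> str:
--         # d = depth from the bottom row (d = n - row index), d >= 1
--         if min(k, n - 1 - k) < d - 1:
--             return ' '
--         if k == half and d <= half - (x + 1):
--             return '│'
--         if d % 4 == 0 and x + d <= k <= n - (x + 1) - d: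
--             return '─'
--         return '■'
--
--     return [[' '] * n] + [[cell(n - r, k) for k in range(n)] for r in range(1, n)]
-- ===== Notes on version B (the rewrite author's own statement) =====
-- stated objective: faster
-- what changed: A fills the matrix with three nested loops, rewriting each row's cells once per j in a while-loop of shrinking overlapping ranges; B builds the matrix in one pass, computing every cell exactly once from a closed-form condition on its row and column.
import Mathlib
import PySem

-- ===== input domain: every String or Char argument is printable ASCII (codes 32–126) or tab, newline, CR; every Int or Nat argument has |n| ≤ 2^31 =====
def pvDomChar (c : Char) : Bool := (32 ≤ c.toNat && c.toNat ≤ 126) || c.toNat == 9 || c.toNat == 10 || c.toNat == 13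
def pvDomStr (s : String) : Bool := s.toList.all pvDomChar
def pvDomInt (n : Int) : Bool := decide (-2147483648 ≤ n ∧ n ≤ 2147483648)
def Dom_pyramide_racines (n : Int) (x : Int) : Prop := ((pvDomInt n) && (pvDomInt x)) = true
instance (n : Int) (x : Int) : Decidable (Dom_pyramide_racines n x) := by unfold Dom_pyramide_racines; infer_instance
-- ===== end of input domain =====

-- B replaces A's triple loop of repeated overwrites by computing each cell once from a
-- closed-form condition on its row and column.

-- ===== PORT A =====
-- one execution of the loop body 'M[i][k] = …' (indices i, k are always in range when A runs,
-- so the total pyGetD/pySetD forms coincide with Python's M[i], M[i][k] = v here)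
def pvBodyA (x : Int) (M : List (List String)) (i k : Int) : List (List String) :=
  let v : String :=
    if k = PySem.Int.floordiv ((PySem.List.pyGetD M 0 []).length : Int) 2 ∧
        |i| ≤ PySem.Int.floordiv (M.length : Int) 2 - (x + 1) then "│"
    else if PySem.Int.mod i 4 = 0 ∧ x - i ≤ k ∧ k ≤ (M.length : Int) - (x + 1) + i then "─"
    else "■"
  PySem.List.pySetD M i (PySem.List.pySetD (PySem.List.pyGetD M i []) k v)

-- 'for k in range(j, len(M) - j): M[i][k] = …'
def pvForK (x i : Int) (M : List (List String)) (j : Int) : List (List String) :=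
  (PySem.List.pyRange j ((M.length : Int) - j) 1).foldl (fun M' k => pvBodyA x M' i k) M

-- 'while j != len(M): … ; j += 1'.  The fuel only makes the recursion structural: A's loop
-- starts at j = -(1+i) ∈ [0, len(M)) and increments j by 1, so fuel len(M)+1 is never exhausted.
def pvWhileJ (x i : Int) : Nat → List (List String) → Int → List (List String)
  | 0, M, _ => M
  | fuel + 1, M, j =>
      if j = (M.length : Int) then M
      else pvWhileJ x i fuel (pvForK x i M j) (j + 1)

-- 'M = [[' ' for _ in range(n)] for _ in range(n)]'
def pvInit (n : Int) : List (List String) :=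
  (PySem.List.pyRange 0 n 1).map (fun _ => (PySem.List.pyRange 0 n 1).map (fun _ => " "))

def pyramide_racines (n : Int) (x : Int) : List (List String) :=
  (PySem.List.pyRange (-1) (-((pvInit n).length : Int)) (-1)).foldl
    (fun M i => pvWhileJ x i (M.length + 1) M (-(1 + i))) (pvInit n)

-- ===== PORT B =====
-- cell value at column k of the row at depth d = n - (row index) from the top
def pvCellB (n x : Int) (d k : Int) : String :=
  if min k (n - 1 - k) < d - 1 then " "
  else if k = PySem.Int.floordiv n 2 ∧ d ≤ PySem.Int.floordiv n 2 - (x + 1) then "│"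
  else if PySem.Int.mod d 4 = 0 ∧ x + d ≤ k ∧ k ≤ n - (x + 1) - d then "─"
  else "■"

def pyramide_racines_alt (n : Int) (x : Int) : List (List String) :=
  if n ≤ 0 then []
  else
    List.replicate n.toNat " " ::
      (List.range (n.toNat - 1)).map (fun r0 : Nat =>
        (List.range n.toNat).map (fun k0 : Nat => pvCellB n x (n - ((r0 : Int) + 1)) (k0 : Int)))

-- ===== PRECONDITION & SPEC =====
def Spec_pyramide_racines (n : Int) (x : Int) (out : List (List String)) : Prop := out = pyramide_racines_alt n x
instance (n : Int) (x : Int) (out : List (List String)) : Decidable (Spec_pyramide_racines n x out) := by unfold Spec_pyramide_racines; infer_instance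

-- ===== CLAIM (what is proved, stated in full; the proofs are below) =====
def Claim_equal_pyramide_racines : Prop := ∀ (n : Int) (x : Int), Dom_pyramide_racines n x → Spec_pyramide_racines n x (pyramide_racines n x)

-- ===== LEMMAS AND PROOFS =====

-- the value A writes into M[i][k], with both lengths fixed at n
def pvV (n x i k : Int) : String :=
  if k = PySem.Int.floordiv n 2 ∧ |i| ≤ PySem.Int.floordiv n 2 - (x + 1) then "│"
  else if PySem.Int.mod i 4 = 0 ∧ x - i ≤ k ∧ k ≤ n - (x + 1) + i then "─"
  else "■"

-- row ρ with the cells in columns [a, b) overwritten by V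
def pvUpd (V : Int → String) (a b : Int) (ρ : List String) : List String :=
  ρ.zipIdx.map (fun p => if a ≤ (p.2 : Int) ∧ (p.2 : Int) < b then V p.2 else p.1)

theorem pvUpd_length (V : Int → String) (a b : Int) (ρ : List String) :
    (pvUpd V a b ρ).length = ρ.length := by simp [pvUpd]

theorem pvUpd_getElem (V : Int → String) (a b : Int) (ρ : List String) (c : Nat)
    (hc : c < (pvUpd V a b ρ).length) :
    (pvUpd V a b ρ)[c] =
      if a ≤ (c : Int) ∧ (c : Int) < b then V c
      else ρ[c]'(by simpa [pvUpd_length] using hc) := by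
  simp [pvUpd]

-- pySetD / pyGetD at a negative in-range index
theorem pvSetD_neg {α : Type} (xs : List α) (i : Int) (v : α)
    (h1 : -(xs.length : Int) ≤ i) (h2 : i < 0) :
    PySem.List.pySetD xs i v = xs.set ((xs.length : Int) + i).toNat v := by
  have h3 : xs.length - (-i).toNat = ((xs.length : Int) + i).toNat := by omega
  simp [PySem.List.pySetD, PySem.List.pySet?, PySem.List.pyIdx?, h2.not_ge, h1, h3]

theorem pvGetD_neg {α : Type} (xs : List α) (i : Int) (d : α)
    (h1 : -(xs.length : Int) ≤ i) (h2 : i < 0) :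
    PySem.List.pyGetD xs i d = xs.getD ((xs.length : Int) + i).toNat d := by
  have h3 : xs.length - (-i).toNat = ((xs.length : Int) + i).toNat := by omega
  have h4 : ((xs.length : Int) + i).toNat < xs.length := by omega
  simp [PySem.List.pyGetD, PySem.List.pyGet?, PySem.List.pyIdx?, h2.not_ge, h1, h3,
    List.getElem?_eq_getElem h4, List.getD]

theorem pvSet_getD_self {α : Type} (l : List α) (r : Nat) (d : α) (h : r < l.length) :
    l.set r (l.getD r d) = l := by
  apply List.ext_getElem (by simp)
  intro c h1 h2
  by_cases hc : c = r
  · subst hc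
    simp [List.getD, List.getElem?_eq_getElem h]
  · rw [List.getElem_set_ne (by omega)]

-- the inner 'for k' fold acting on a single row
theorem pvRowFold (V : Int → String) (b : Int) : ∀ (m : Nat) (a : Int) (ρ : List String),
    0 ≤ a → (b - a).toNat = m →
    (PySem.List.pyRange a b 1).foldl (fun row k => PySem.List.pySetD row k (V k)) ρ =
      pvUpd V a b ρ := by
  intro m
  induction m with
  | zero =>
    intro a ρ ha hm
    rw [PySem.List.pyRange_one_eq_nil (by omega)]
    apply List.ext_getElem (by simp [pvUpd_length])
    intro c h1 h2
    rw [pvUpd_getElem _ _ _ _ c h2]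
    simp only [List.foldl_nil]
    rw [if_neg (by omega)]
  | succ m ih =>
    intro a ρ ha hm
    rw [PySem.List.pyRange_one_cons (by omega), List.foldl_cons,
      PySem.List.pySetD_of_nonneg _ _ ha, ih (a + 1) _ (by omega) (by omega)]
    apply List.ext_getElem (by simp [pvUpd_length])
    intro c h1 h2
    rw [pvUpd_getElem _ _ _ _ c h2]
    have hc : c < ρ.length := by simpa [pvUpd_length] using h2
    rw [pvUpd_getElem _ _ _ _ c (by simpa [pvUpd_length] using hc)]
    by_cases h5 : a + 1 ≤ (c : Int) ∧ (c : Int) < b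
    · rw [if_pos h5, if_pos (by omega)]
    · rw [if_neg h5]
      by_cases h6 : (c : Int) = a
      · rw [if_pos (by omega)]
        have : c = a.toNat := by omega
        subst this
        rw [List.getElem_set_self]
        congr 1
        omega
      · rw [if_neg (by omega), List.getElem_set_ne (by omega)]

-- the invariant carried through A's loops
def pvInv (n' : Nat) (M : List (List String)) : Prop :=
  M.length = n' ∧ ∀ ρ ∈ M, ρ.length = n'

-- one body step rewritten as an update of row r = n' + i
theorem pvBodyA_eq (n' : Nat) (x i k : Int) (M : List (List String))
    (hInv : pvInv n' M) (hi1 : -(n' : Int) < i) (hi2 : i < 0) (hn : 0 < n') :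
    pvBodyA x M i k =
      M.set ((n' : Int) + i).toNat
        (PySem.List.pySetD (M.getD ((n' : Int) + i).toNat []) k (pvV (n' : Int) x i k)) := by
  obtain ⟨hlen, hrows⟩ := hInv
  have h0 : (PySem.List.pyGetD M 0 []).length = n' := by
    have hM0 : M.getD 0 [] ∈ M := by
      have : 0 < M.length := by omega
      simp [List.getD, List.getElem?_eq_getElem this]
    rw [PySem.List.pyGetD_zero]
    exact hrows _ hM0
  have hgi : PySem.List.pyGetD M i [] = M.getD ((n' : Int) + i).toNat [] := by
    rw [pvGetD_neg M i [] (by omega) hi2, hlen]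
  have hsi : ∀ ρ', PySem.List.pySetD M i ρ' = M.set ((n' : Int) + i).toNat ρ' := by
    intro ρ'
    rw [pvSetD_neg M i ρ' (by omega) hi2, hlen]
  simp only [pvBodyA, pvV, h0, hlen, hgi, hsi]

-- the 'for k' fold over any list of nonnegative ks, lifted to the matrix
theorem pvMatFold (n' : Nat) (x i : Int) (hi1 : -(n' : Int) < i) (hi2 : i < 0) (hn : 0 < n') :
    ∀ (ks : List Int) (M : List (List String)), (∀ k ∈ ks, 0 ≤ k) → pvInv n' M →
    ks.foldl (fun M' k => pvBodyA x M' i k) M =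
      M.set ((n' : Int) + i).toNat
        (ks.foldl (fun ρ k => PySem.List.pySetD ρ k (pvV (n' : Int) x i k))
          (M.getD ((n' : Int) + i).toNat [])) := by
  intro ks
  induction ks with
  | nil =>
    intro M hks hInv
    obtain ⟨hlen, hrows⟩ := hInv
    simp only [List.foldl_nil]
    rw [pvSet_getD_self _ _ _ (by omega)]
  | cons k ks ih =>
    intro M hks hInv
    obtain ⟨hlen, hrows⟩ := hInv
    have hr : ((n' : Int) + i).toNat < M.length := by omega
    simp only [List.foldl_cons]
    rw [pvBodyA_eq n' x i k M ⟨hlen, hrows⟩ hi1 hi2 hn]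
    set ρ' := PySem.List.pySetD (M.getD ((n' : Int) + i).toNat []) k (pvV (n' : Int) x i k) with hρ'
    have hInv' : pvInv n' (M.set ((n' : Int) + i).toNat ρ') := by
      refine ⟨by simp [hlen], ?_⟩
      intro ρ hρ
      rcases List.mem_or_eq_of_mem_set hρ with h | h
      · exact hrows _ h
      · subst h
        rw [hρ', PySem.List.length_pySetD]
        apply hrows
        simp [List.getD, List.getElem?_eq_getElem hr]
    rw [ih _ (fun k hk => hks k (List.mem_cons_of_mem _ hk)) hInv',
      List.set_set, List.getD, List.getElem?_eq_getElem (by simp only [List.length_set, hlen]; omega)]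
    rw [List.getElem_set_self, Option.getD_some]

-- region shrinking: rewriting a sub-region with the same values changes nothing
theorem pvUpd_pvUpd (V : Int → String) (a b a' b' : Int) (ρ : List String)
    (h1 : a ≤ a') (h2 : b' ≤ b) :
    pvUpd V a' b' (pvUpd V a b ρ) = pvUpd V a b ρ := by
  apply List.ext_getElem (by simp [pvUpd_length])
  intro c hc1 hc2
  rw [pvUpd_getElem _ _ _ _ c hc1]
  by_cases h : a' ≤ (c : Int) ∧ (c : Int) < b'
  · rw [if_pos h, pvUpd_getElem _ _ _ _ c hc2, if_pos (by omega)]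
  · rw [if_neg h]

-- the whole 'while j' loop as a single region update of row r = n' + i
theorem pvWhile_eq (n' : Nat) (x i : Int) (hi1 : -(n' : Int) < i) (hi2 : i < 0) (hn : 0 < n') :
    ∀ (fuel : Nat) (j : Int) (M : List (List String)), pvInv n' M → 0 ≤ j → j ≤ (n' : Int) →
    ((n' : Int) - j).toNat < fuel →
    pvWhileJ x i fuel M j =
      M.set ((n' : Int) + i).toNat
        (pvUpd (pvV (n' : Int) x i) j ((n' : Int) - j) (M.getD ((n' : Int) + i).toNat [])) := by
  intro fuel
  induction fuel with
  | zero => omega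
  | succ fuel ih =>
    intro j M hInv hj0 hjn hfuel
    obtain ⟨hlen, hrows⟩ := hInv
    have hr : ((n' : Int) + i).toNat < M.length := by omega
    by_cases hj : j = (M.length : Int)
    · rw [pvWhileJ, if_pos hj]
      have hempty : pvUpd (pvV (n' : Int) x i) j ((n' : Int) - j)
          (M.getD ((n' : Int) + i).toNat []) = M.getD ((n' : Int) + i).toNat [] := by
        apply List.ext_getElem (by simp [pvUpd_length])
        intro c h1 h2
        rw [pvUpd_getElem _ _ _ _ c h1, if_neg (by omega)]
      rw [hempty, pvSet_getD_self _ _ _ hr]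
    · rw [pvWhileJ, if_neg hj]
      have hjn' : j < (n' : Int) := by omega
      have hforK : pvForK x i M j =
          M.set ((n' : Int) + i).toNat
            (pvUpd (pvV (n' : Int) x i) j ((n' : Int) - j) (M.getD ((n' : Int) + i).toNat [])) := by
        rw [pvForK, hlen,
          pvMatFold n' x i hi1 hi2 hn _ M
            (fun k hk => by have := (PySem.List.mem_pyRange_one.mp hk).1; omega) ⟨hlen, hrows⟩,
          pvRowFold _ _ (((n' : Int) - j) - j).toNat j _ hj0 rfl]
      rw [hforK]
      set ρ' := pvUpd (pvV (n' : Int) x i) j ((n' : Int) - j) (M.getD ((n' : Int) + i).toNat [])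
        with hρ'
      have hInv' : pvInv n' (M.set ((n' : Int) + i).toNat ρ') := by
        refine ⟨by simp [hlen], ?_⟩
        intro ρ hρ
        rcases List.mem_or_eq_of_mem_set hρ with h | h
        · exact hrows _ h
        · subst h
          rw [hρ', pvUpd_length]
          apply hrows
          simp [List.getD, List.getElem?_eq_getElem hr]
      rw [ih (j + 1) _ hInv' (by omega) (by omega) (by omega),
        List.set_set, List.getD, List.getElem?_eq_getElem (by simp only [List.length_set, hlen]; omega)]
      rw [List.getElem_set_self, Option.getD_some]
      congr 1
      have hle : (n' : Int) - (j + 1) ≤ (n' : Int) - j := by omega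
      rw [pvUpd_pvUpd _ _ _ _ _ _ (by omega) hle]

-- the finished contents of row r (r = n' + i, region [n'-r-1, r+1))
def pvRow (n' : Nat) (x : Int) (r : Nat) : List String :=
  pvUpd (pvV (n' : Int) x ((r : Int) - (n' : Int))) ((n' : Int) - r - 1) ((r : Int) + 1)
    (List.replicate n' " ")

-- the matrix after the first t iterations of A's outer loop (rows n'-t … n'-1 finished)
def pvMat (n' : Nat) (x : Int) (t : Nat) : List (List String) :=
  (List.range n').map (fun r => if n' - t ≤ r then pvRow n' x r else List.replicate n' " ")

theorem pvMat_length (n' : Nat) (x : Int) (t : Nat) : (pvMat n' x t).length = n' := by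
  simp [pvMat]

theorem pvMat_getElem (n' : Nat) (x : Int) (t : Nat) (c : Nat) (hc : c < (pvMat n' x t).length) :
    (pvMat n' x t)[c] = if n' - t ≤ c then pvRow n' x c else List.replicate n' " " := by
  simp [pvMat]

theorem pvMat_inv (n' : Nat) (x : Int) (t : Nat) : pvInv n' (pvMat n' x t) := by
  refine ⟨pvMat_length n' x t, ?_⟩
  intro ρ hρ
  simp only [pvMat, List.mem_map] at hρ
  obtain ⟨r, _, hr⟩ := hρ
  by_cases h : n' - t ≤ r <;> simp [← hr, h, pvRow, pvUpd_length]

-- the outer 'for i' loop, one iteration at a time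
theorem pvOuter (n' : Nat) (x : Int) (hn : 1 ≤ n') : ∀ (t : Nat), t ≤ n' - 1 →
    ((List.range t).map (fun m : Nat => (-1 : Int) - (m : Int))).foldl
      (fun M i => pvWhileJ x i (M.length + 1) M (-(1 + i))) (pvMat n' x 0) = pvMat n' x t := by
  intro t
  induction t with
  | zero => intro _; rfl
  | succ t ih =>
    intro ht
    rw [List.range_succ, List.map_append, List.foldl_append, ih (by omega)]
    simp only [List.map_cons, List.map_nil, List.foldl_cons, List.foldl_nil]
    have hi1 : -((n' : Nat) : Int) < (-1 : Int) - t := by omega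
    have hi2 : ((-1 : Int) - t) < 0 := by omega
    have hj : -(1 + ((-1 : Int) - t)) = (t : Int) := by ring
    rw [hj, pvMat_length,
      pvWhile_eq n' x ((-1 : Int) - t) hi1 hi2 (by omega) (n' + 1) t (pvMat n' x t)
        (pvMat_inv n' x t) (by omega) (by omega) (by omega)]
    have hr : (((n' : Nat) : Int) + ((-1 : Int) - t)).toNat = n' - 1 - t := by omega
    have hrow : (pvMat n' x t).getD (n' - 1 - t) [] = List.replicate n' " " := by
      rw [List.getD, List.getElem?_eq_getElem (by rw [pvMat_length]; omega), Option.getD_some,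
        pvMat_getElem n' x t _ (by rw [pvMat_length]; omega), if_neg (by omega)]
    rw [hr, hrow]
    apply List.ext_getElem (by simp [pvMat_length])
    intro c h1 h2
    rw [pvMat_getElem n' x (t + 1) c h2]
    by_cases hc : c = n' - 1 - t
    · subst hc
      rw [List.getElem_set_self, if_pos (by omega)]
      unfold pvRow
      have e1 : ((n' - 1 - t : Nat) : Int) - (n' : Int) = (-1 : Int) - t := by omega
      have e2 : ((n' : Nat) : Int) - ((n' - 1 - t : Nat) : Int) - 1 = (t : Int) := by omega
      have e3 : ((n' - 1 - t : Nat) : Int) + 1 = ((n' : Nat) : Int) - t := by omega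
      rw [e1, e2, e3]
    · have hcn : c < n' := by simp only [List.length_set, pvMat_length] at h1; exact h1
      rw [List.getElem_set_ne (by omega),
        pvMat_getElem n' x t c (by rw [pvMat_length]; exact hcn)]
      by_cases h : n' - t ≤ c
      · rw [if_pos h, if_pos (by omega)]
      · rw [if_neg h, if_neg (by omega)]

-- A computes pvMat
theorem pvInit_eq (n : Int) (x : Int) : pvInit n = pvMat n.toNat x 0 := by
  apply List.ext_getElem (by simp [pvInit, pvMat_length, PySem.List.length_pyRange_one])
  intro c h1 h2
  rw [pvMat_getElem n.toNat x 0 c h2, if_neg (by rw [pvMat_length] at h2; omega)]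
  simp only [pvInit, List.getElem_map]
  rw [List.map_const', PySem.List.length_pyRange_one]
  norm_num

theorem pvA_eq (n x : Int) (hn : 1 ≤ n) :
    pyramide_racines n x = pvMat n.toNat x (n.toNat - 1) := by
  unfold pyramide_racines
  rw [pvInit_eq n x, pvMat_length]
  have houter : PySem.List.pyRange (-1) (-((n.toNat : Nat) : Int)) (-1) =
      (List.range (n.toNat - 1)).map (fun m : Nat => (-1 : Int) - (m : Int)) := by
    rw [PySem.List.pyRange_neg_one]
    have h9 : ((-1 : Int) - -((n.toNat : Nat) : Int)).toNat = n.toNat - 1 := by omega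
    rw [h9]
  rw [houter, pvOuter n.toNat x (by omega) (n.toNat - 1) (by omega)]

-- agreement of the two cell formulas inside / outside the written region
theorem pvCell_eq (n x : Int) (hn : 1 ≤ n) (c k : Nat) (hc1 : 1 ≤ c) (hc2 : (c : Int) < n)
    (hk : (k : Int) < n) :
    (if n - c - 1 ≤ (k : Int) ∧ (k : Int) < (c : Int) + 1 then pvV n x ((c : Int) - n) k
     else " ") = pvCellB n x (n - c) k := by
  have habs : |(c : Int) - n| = n - c := by rw [abs_of_nonpos (by omega)]; ring
  have hmod : (PySem.Int.mod ((c : Int) - n) 4 = 0) = (PySem.Int.mod (n - c) 4 = 0) := by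
    simp only [PySem.Int.mod, Int.fmod_eq_emod]
    refine propext ?_
    constructor <;> intro h <;> omega
  have e1 : x - ((c : Int) - n) = x + (n - c) := by ring
  have e2 : n - (x + 1) + ((c : Int) - n) = n - (x + 1) - (n - c) := by ring
  simp only [pvV, pvCellB, habs, hmod, e1, e2]
  by_cases hP : n - c - 1 ≤ (k : Int) ∧ (k : Int) < (c : Int) + 1
  · rw [if_pos hP, if_neg (show ¬ min (k : Int) (n - 1 - k) < n - c - 1 by
      simp only [min_lt_iff]; omega)]
  · rw [if_neg hP, if_pos (show min (k : Int) (n - 1 - k) < n - c - 1 by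
      simp only [min_lt_iff]; omega)]

-- B computes pvMat too
theorem pvRowB (n x : Int) (hn : 1 ≤ n) (c : Nat) (hc1 : 1 ≤ c) (hc2 : c < n.toNat) :
    pvRow n.toNat x c =
      (List.range n.toNat).map (fun k0 : Nat => pvCellB n x (n - (c : Int)) (k0 : Int)) := by
  have hnn : ((n.toNat : Nat) : Int) = n := by omega
  unfold pvRow
  rw [hnn]
  apply List.ext_getElem (by simp [pvUpd_length])
  intro k hk1 hk2
  have hkn : k < n.toNat := by simpa [pvUpd_length] using hk1
  rw [pvUpd_getElem _ _ _ _ k hk1]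
  simp only [List.getElem_map, List.getElem_range, List.getElem_replicate]
  rw [← pvCell_eq n x hn c k (by omega) (by omega) (by omega)]

theorem pvB_eq (n x : Int) (hn : 1 ≤ n) :
    pyramide_racines_alt n x = pvMat n.toNat x (n.toNat - 1) := by
  unfold pyramide_racines_alt
  rw [if_neg (by omega)]
  apply List.ext_getElem (by simp [pvMat_length]; omega)
  intro c h1 h2
  rw [pvMat_getElem _ _ _ c h2]
  have hcn : c < n.toNat := by rw [pvMat_length] at h2; exact h2
  cases c with
  | zero =>
    rw [if_neg (by omega)]
    rfl
  | succ c =>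
    rw [if_pos (by omega)]
    simp only [List.getElem_cons_succ, List.getElem_map, List.getElem_range]
    rw [pvRowB n x hn (c + 1) (by omega) (by omega)]
    have h9 : ((c + 1 : Nat) : Int) = (c : Int) + 1 := by push_cast; ring
    rw [h9]

-- ===== VERDICT (by name: the statement is the Claim_ definition above) =====
theorem pyramide_racines_spec : Claim_equal_pyramide_racines := by
  intro n x _
  unfold Spec_pyramide_racines
  by_cases hn : 1 ≤ n
  · rw [pvA_eq n x hn, pvB_eq n x hn]
  · unfold pyramide_racines pyramide_racines_alt pvInit
    rw [if_pos (by omega), PySem.List.pyRange_one_eq_nil (by omega)]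
    simp
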